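-- pv_equiv track=rewrite | github.com/k-harada/AtCoder | AGC/AGC043/B.py | solve_base
-- ===== SOURCE A (Python) =====
-- def solve_base(n, a_list):
--     # 2 not in a_list
--     # odd or even
--     factorial_count_2 = [0] * n
--     for i in range(1, n):
--         p = i
--         cnt = 0
--         while p % 2 == 0:
--             p = p // 2
--             cnt += 1
--         factorial_count_2[i] = factorial_count_2[i - 1] + cnt
--
--     mod_2 = 0
--     for i in range(n):
--         if factorial_count_2[n - 1] == factorial_count_2[i] + factorial_count_2[n - 1 - i]:
--             mod_2 += a_list[i] % 2
--             mod_2 %= 2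
--
--     return mod_2
-- ===== SOURCE B (Python) =====
-- def solve_base(n, a_list):
--     # C(n-1, i) is odd iff no carry in i + (n-1-i), i.e. the popcounts add up
--     # (Legendre: v2(k!) = k - popcount(k)); xor-accumulate the parities.
--     m = n - 1
--     r = 0
--     for i in range(n):
--         if i.bit_count() + (m - i).bit_count() == m.bit_count():
--             r ^= a_list[i] % 2
--     return r
-- ===== Notes on version B (the rewrite author's own statement) =====
-- stated objective: simpler
-- what changed: Replaces the nu_2-of-factorial prefix table (built with an inner trailing-zero while loop) by the closed-form popcount identity bit_count(i)+bit_count(n-1-i)==bit_count(n-1) tested directly, xor-accumulating parities instead of add-then-mod.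
import Mathlib
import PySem

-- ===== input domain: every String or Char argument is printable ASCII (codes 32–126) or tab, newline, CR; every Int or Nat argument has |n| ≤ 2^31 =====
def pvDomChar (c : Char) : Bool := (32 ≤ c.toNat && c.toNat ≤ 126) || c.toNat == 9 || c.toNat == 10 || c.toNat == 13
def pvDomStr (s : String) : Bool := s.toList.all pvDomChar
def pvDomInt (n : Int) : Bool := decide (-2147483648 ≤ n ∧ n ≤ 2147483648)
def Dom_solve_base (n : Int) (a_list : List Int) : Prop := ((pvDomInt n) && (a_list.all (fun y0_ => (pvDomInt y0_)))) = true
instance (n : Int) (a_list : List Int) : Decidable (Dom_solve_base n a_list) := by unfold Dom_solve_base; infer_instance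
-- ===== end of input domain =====

-- B replaces A's nu2-of-factorial prefix table by the closed-form popcount test
-- bit_count(i)+bit_count(n-1-i)==bit_count(n-1), xor-accumulating parities (objective: simpler).

-- ===== PORT A =====
-- 'while p % 2 == 0: p //= 2; cnt += 1'.  The 'p ≠ 0' conjunct is a totality guard only:
-- Python diverges at p = 0, and the call sites pass p = i ≥ 1.
def pvCnt2 (p : Int) (cnt : Int) : Int :=
  if h : p ≠ 0 ∧ PySem.Int.mod p 2 = 0 then pvCnt2 (PySem.Int.floordiv p 2) (cnt + 1) else cnt
termination_by p.natAbs
decreasing_by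
  rcases h with ⟨hp, hm⟩
  rw [PySem.Int.mod_eq_zero_iff_dvd] at hm
  rcases hm with ⟨q, rfl⟩
  rw [PySem.Int.floordiv_eq_ediv_of_pos (by omega), Int.mul_ediv_cancel_left _ (by omega : (2:Int) ≠ 0)]
  omega

-- 'factorial_count_2 = [0]*n; for i in range(1, n): … factorial_count_2[i] = factorial_count_2[i-1] + cnt'
def pvTableA (n : Int) : List Int :=
  (PySem.List.pyRange 1 n 1).foldl
    (fun fc i => PySem.List.pySetD fc i (PySem.List.pyGetD fc (i - 1) 0 + pvCnt2 i 0))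
    (PySem.List.pyRepeat [(0 : Int)] n)

def solve_base (n : Int) (a_list : List Int) : Int :=
  let fc := pvTableA n
  (PySem.List.pyRange 0 n 1).foldl
    (fun mod_2 i =>
      if PySem.List.pyGetD fc (n - 1) 0 = PySem.List.pyGetD fc i 0 + PySem.List.pyGetD fc (n - 1 - i) 0 then
        PySem.Int.mod (mod_2 + PySem.Int.mod (PySem.List.pyGetD a_list i 0) 2) 2
      else mod_2) 0

-- ===== PORT B =====
def solve_base_alt (n : Int) (a_list : List Int) : Int :=
  let m := n - 1
  (PySem.List.pyRange 0 n 1).foldl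
    (fun r i =>
      if PySem.Int.bitCount i + PySem.Int.bitCount (m - i) = PySem.Int.bitCount m then
        PySem.Int.bxor r (PySem.Int.mod (PySem.List.pyGetD a_list i 0) 2)
      else r) 0

-- ===== PRECONDITION & SPEC =====
-- A raises IndexError on a_list[n-1] (always reached) when 0 < n and a_list is shorter than n.
def Pre_solve_base (n : Int) (a_list : List Int) : Prop := n ≤ 0 ∨ n ≤ (a_list.length : Int)
instance (n : Int) (a_list : List Int) : Decidable (Pre_solve_base n a_list) := by unfold Pre_solve_base; infer_instance
def pvWitness_solve_base : Int × List Int := (3, [1, 2, 3])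

def Spec_solve_base (n : Int) (a_list : List Int) (out : Int) : Prop := out = solve_base_alt n a_list
instance (n : Int) (a_list : List Int) (out : Int) : Decidable (Spec_solve_base n a_list out) := by unfold Spec_solve_base; infer_instance

-- ===== CLAIM (what is proved, stated in full; the proofs are below) =====
def Claim_equal_solve_base : Prop := ∀ (n : Int) (a_list : List Int), Dom_solve_base n a_list → Pre_solve_base n a_list → Spec_solve_base n a_list (solve_base n a_list)

-- ===== LEMMAS AND PROOFS =====

-- nu2 k = number of factors 2 in k (nu2 0 = 0 by convention)
def pvNu2 (k : Nat) : Nat :=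
  if k ≠ 0 ∧ k % 2 = 0 then pvNu2 (k / 2) + 1 else 0
termination_by k
decreasing_by omega

-- F k = nu2 (k!) = A's factorial_count_2[k]
def pvF : Nat → Nat
  | 0 => 0
  | k + 1 => pvF k + pvNu2 (k + 1)

def pvPc (k : Nat) : Nat := PySem.Int.bitCount (k : Int)

theorem pvCnt2_eq (k : Nat) (hk : 0 < k) (c : Int) : pvCnt2 (k : Int) c = c + (pvNu2 k : Int) := by
  induction k using Nat.strong_induction_on generalizing c with
  | _ k ih =>
    have hmod : PySem.Int.mod (k : Int) 2 = ((k % 2 : Nat) : Int) := by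
      exact_mod_cast PySem.Int.mod_natCast k 2
    have hdiv : PySem.Int.floordiv (k : Int) 2 = ((k / 2 : Nat) : Int) := by
      exact_mod_cast PySem.Int.floordiv_natCast k 2
    rw [pvCnt2, pvNu2]
    by_cases he : k % 2 = 0
    · rw [dif_pos ⟨by exact_mod_cast (by omega : (k : Int) ≠ 0), by rw [hmod]; exact_mod_cast he⟩,
          if_pos (show k ≠ 0 ∧ k % 2 = 0 from ⟨by omega, he⟩), hdiv, ih (k / 2) (by omega) (by omega) (c + 1)]
      push_cast; ring
    · rw [dif_neg (by rw [hmod]; rintro ⟨-, hc⟩; exact he (by exact_mod_cast hc)),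
          if_neg (show ¬(k ≠ 0 ∧ k % 2 = 0) from fun h => he h.2)]
      simp

theorem pvF_add_pc_aux (k : Nat) : pvNu2 (k + 1) + pvPc (k + 1) = pvPc k + 1 := by
  induction k using Nat.strong_induction_on with
  | _ k ih =>
    rcases Nat.even_or_odd k with ⟨q, hq⟩ | ⟨q, hq⟩
    · -- k = q + q: k + 1 odd
      subst hq
      rw [pvNu2, if_neg (show ¬(q + q + 1 ≠ 0 ∧ (q + q + 1) % 2 = 0) from by omega)]
      unfold pvPc
      rw [PySem.Int.bitCount_natCast (show 0 < q + q + 1 by omega)]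
      have h1 : (q + q + 1) % 2 = 1 := by omega
      have h2 : (q + q + 1) / 2 = q := by omega
      rw [h1, h2]
      rcases Nat.eq_zero_or_pos q with rfl | hq0
      · decide
      · rw [PySem.Int.bitCount_natCast (show 0 < q + q by omega)]
        have h3 : (q + q) % 2 = 0 := by omega
        have h4 : (q + q) / 2 = q := by omega
        rw [h3, h4]
        omega
    · -- k = 2q + 1: k + 1 = 2(q + 1)
      subst hq
      rw [pvNu2, if_pos (show 2 * q + 1 + 1 ≠ 0 ∧ (2 * q + 1 + 1) % 2 = 0 from ⟨by omega, by omega⟩)]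
      have h2 : (2 * q + 1 + 1) / 2 = q + 1 := by omega
      rw [h2]
      unfold pvPc
      rw [PySem.Int.bitCount_natCast (show 0 < 2 * q + 1 + 1 by omega)]
      have h3 : (2 * q + 1 + 1) % 2 = 0 := by omega
      rw [h3, h2]
      rw [PySem.Int.bitCount_natCast (show 0 < 2 * q + 1 by omega)]
      have h4 : (2 * q + 1) % 2 = 1 := by omega
      have h5 : (2 * q + 1) / 2 = q := by omega
      rw [h4, h5]
      have hih := ih q (by omega)
      unfold pvPc at hih
      omega

theorem pvF_add_pc (k : Nat) : pvF k + pvPc k = k := by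
  induction k with
  | zero => simp [pvF, pvPc, PySem.Int.bitCount_zero]
  | succ k ih =>
    have := pvF_add_pc_aux k
    rw [pvF]
    omega

-- the table after processing range(1, k) (1 ≤ k ≤ n.toNat)
theorem pvTableA_inv (n : Int) (k : Nat) (hk : k ≤ n.toNat) (hk1 : 1 ≤ k) :
    (PySem.List.pyRange 1 (k : Int) 1).foldl
      (fun fc i => PySem.List.pySetD fc i (PySem.List.pyGetD fc (i - 1) 0 + pvCnt2 i 0))
      (PySem.List.pyRepeat [(0 : Int)] n)
    = (List.range n.toNat).map (fun j => if j < k then (pvF j : Int) else 0) := by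
  induction k with
  | zero => omega
  | succ k ih =>
    rcases Nat.eq_zero_or_pos k with rfl | hk0
    · -- range(1, 1) = []
      rw [PySem.List.pyRange_one_eq_nil (by norm_num)]
      simp only [List.foldl_nil]
      rw [PySem.List.pyRepeat_singleton]
      refine List.ext_getElem (by simp) ?_
      intro i h1 h2
      simp only [List.getElem_map, List.getElem_range, List.getElem_replicate]
      split
      · next h =>
        have : i = 0 := by omega
        subst this; simp [pvF]
      · rfl
    · have hcast : ((k + 1 : Nat) : Int) = (k : Int) + 1 := by push_cast; ring
      rw [hcast, PySem.List.pyRange_one_succ_right (by exact_mod_cast hk0), List.foldl_append,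
          ih (by omega) hk0]
      simp only [List.foldl_cons, List.foldl_nil]
      have hkn : k < n.toNat := by omega
      have hc1 : ((k : Int) - 1) = ((k - 1 : Nat) : Int) := by omega
      rw [hc1, PySem.List.pyGetD_natCast]
      have hget : (List.map (fun j => if j < k then (pvF j : Int) else 0) (List.range n.toNat)).getD (k - 1) 0
          = (pvF (k - 1) : Int) := by
        rw [List.getD_eq_getElem?_getD,
            List.getElem?_eq_getElem (by simp only [List.length_map, List.length_range]; omega)]
        simp only [List.getElem_map, List.getElem_range, Option.getD_some]
        rw [if_pos (by omega)]
      rw [hget, pvCnt2_eq k hk0 _, PySem.List.pySetD_natCast, zero_add]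
      have hFk : (pvF (k - 1) : Int) + (pvNu2 k : Int) = (pvF k : Int) := by
        have h5 : pvF k = pvF (k - 1) + pvNu2 k := by
          have hkk : k = (k - 1) + 1 := by omega
          conv_lhs => rw [hkk]
          rw [pvF, ← hkk]
        rw [h5]; push_cast; ring
      rw [hFk]
      refine List.ext_getElem (by simp) ?_
      intro i h1 h2
      simp only [List.length_map, List.length_range] at h2
      rw [List.getElem_set]
      simp only [List.getElem_map, List.getElem_range]
      by_cases hik : k = i
      · subst hik; rw [if_pos rfl, if_pos (by omega)]
      · rw [if_neg hik]
        by_cases h3 : i < k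
        · rw [if_pos h3, if_pos (by omega)]
        · rw [if_neg h3, if_neg (by omega)]

theorem pvTableA_eq (n : Int) (hn : 0 < n) :
    pvTableA n = (List.range n.toNat).map (fun j => if j < n.toNat then (pvF j : Int) else 0) := by
  unfold pvTableA
  have h : (n : Int) = ((n.toNat : Nat) : Int) := by omega
  rw [h]
  exact pvTableA_inv n n.toNat (le_refl _) (by omega)

theorem pvTable_get (n : Int) (hn : 0 < n) (j : Nat) (hj : j < n.toNat) :
    PySem.List.pyGetD (pvTableA n) ((j : Nat) : Int) 0 = (pvF j : Int) := by
  rw [pvTableA_eq n hn, PySem.List.pyGetD_natCast, List.getD_eq_getElem?_getD,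
      List.getElem?_eq_getElem (by simp only [List.length_map, List.length_range]; omega)]
  simp only [List.getElem_map, List.getElem_range, Option.getD_some]
  rw [if_pos hj]

-- the two loop conditions agree on 0 ≤ i < n
theorem pvCond_iff (n : Int) (hn : 0 < n) (i : Int) (h0 : 0 ≤ i) (h1 : i < n) :
    (PySem.List.pyGetD (pvTableA n) (n - 1) 0
       = PySem.List.pyGetD (pvTableA n) i 0 + PySem.List.pyGetD (pvTableA n) (n - 1 - i) 0)
    ↔ (PySem.Int.bitCount i + PySem.Int.bitCount (n - 1 - i) = PySem.Int.bitCount (n - 1)) := by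
  set N := n.toNat with hN
  set j := i.toNat with hj
  have hjN : j < N := by omega
  have e3 : (n - 1 - i : Int) = ((N - 1 - j : Nat) : Int) := by omega
  have e2 : (i : Int) = ((j : Nat) : Int) := by omega
  have e1 : (n - 1 : Int) = ((N - 1 : Nat) : Int) := by omega
  rw [e3, e2, e1]
  rw [pvTable_get n hn (N - 1) (by omega), pvTable_get n hn j hjN,
      pvTable_get n hn (N - 1 - j) (by omega)]
  have a1 := pvF_add_pc (N - 1)
  have a2 := pvF_add_pc j
  have a3 := pvF_add_pc (N - 1 - j)
  unfold pvPc at a1 a2 a3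
  constructor
  · intro h
    have hF : pvF (N - 1) = pvF j + pvF (N - 1 - j) := by exact_mod_cast h
    omega
  · intro h
    have hF : pvF (N - 1) = pvF j + pvF (N - 1 - j) := by omega
    exact_mod_cast hF

-- parity values
theorem pvParity_mem (a : Int) : PySem.Int.mod a 2 = 0 ∨ PySem.Int.mod a 2 = 1 := by
  have h1 := PySem.Int.mod_nonneg a (by norm_num : (0:Int) < 2)
  have h2 := PySem.Int.mod_lt a (by norm_num : (0:Int) < 2)
  omega

theorem pvStep_eq (r a : Int) (hr : r = 0 ∨ r = 1) :
    PySem.Int.mod (r + PySem.Int.mod a 2) 2 = PySem.Int.bxor r (PySem.Int.mod a 2) := by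
  rcases pvParity_mem a with ha | ha <;> rcases hr with rfl | rfl <;> rw [ha] <;> decide

theorem pvLoop_eq (n : Int) (hn : 0 < n) (a_list : List Int) (L : List Int)
    (hL : ∀ i ∈ L, 0 ≤ i ∧ i < n) (r : Int) (hr : r = 0 ∨ r = 1) :
    L.foldl (fun mod_2 i =>
      if PySem.List.pyGetD (pvTableA n) (n - 1) 0
           = PySem.List.pyGetD (pvTableA n) i 0 + PySem.List.pyGetD (pvTableA n) (n - 1 - i) 0 then
        PySem.Int.mod (mod_2 + PySem.Int.mod (PySem.List.pyGetD a_list i 0) 2) 2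
      else mod_2) r
    = L.foldl (fun r i =>
      if PySem.Int.bitCount i + PySem.Int.bitCount ((n - 1) - i) = PySem.Int.bitCount (n - 1) then
        PySem.Int.bxor r (PySem.Int.mod (PySem.List.pyGetD a_list i 0) 2)
      else r) r := by
  induction L generalizing r with
  | nil => rfl
  | cons i t ih =>
    simp only [List.foldl_cons]
    have hi := hL i (by simp)
    have hcond := pvCond_iff n hn i hi.1 hi.2
    by_cases hc : PySem.Int.bitCount i + PySem.Int.bitCount ((n - 1) - i) = PySem.Int.bitCount (n - 1)
    · rw [if_pos (hcond.mpr hc), if_pos hc, pvStep_eq r _ hr]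
      refine ih (fun x hx => hL x (by simp [hx])) _ ?_
      rcases pvParity_mem (PySem.List.pyGetD a_list i 0) with ha | ha <;>
        rcases hr with rfl | rfl <;> rw [ha] <;>
        first
        | exact Or.inl (by decide)
        | exact Or.inr (by decide)
    · rw [if_neg (fun h => hc (hcond.mp h)), if_neg hc]
      exact ih (fun x hx => hL x (by simp [hx])) r hr

-- ===== VERDICT (by name: the statement is the Claim_ definition above) =====
theorem solve_base_spec : Claim_equal_solve_base := by
  intro n a_list _ _
  simp only [Spec_solve_base, solve_base, solve_base_alt]
  rcases le_or_gt n 0 with hn | hn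
  · rw [PySem.List.pyRange_one_eq_nil hn]; rfl
  · exact pvLoop_eq n hn a_list _ (fun i hi => by
      rw [PySem.List.mem_pyRange_one] at hi; exact hi) 0 (Or.inl rfl)
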